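-- pv_equiv track=rewrite | github.com/X10NLUN1X/Xionimus | backend/app/core/coding_prompt.py | should_offer_post_code_options
-- ===== SOURCE A (Python) =====
-- from typing import Dict, Any, Optional, List
--
-- def should_offer_post_code_options(messages: List[Dict[str, str]]) -> bool:
--     """
--     Check if we should offer post-code options
--     Returns True ONLY if:
--     1. Last assistant message contains substantial code blocks
--     2. This is NOT the first response to a simple prompt
--     3. Conversation has progressed beyond initial request
--     """
--     if not messages or len(messages) < 3:  # Minimum: user prompt, assistant response, user follow-up
--         return False
--
--     # Get last assistant message
--     last_assistant_msg = None
--     for msg in reversed(messages):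
--         if msg.get("role") == "assistant":
--             last_assistant_msg = msg.get("content", "")
--             break
--
--     if not last_assistant_msg:
--         return False
--
--     # Check if message contains code blocks (``` markers)
--     has_code = "```" in last_assistant_msg
--
--     # Check if message is substantial (longer than 1000 chars for code)
--     is_substantial = len(last_assistant_msg) > 1000
--
--     # Count how many assistant messages we have (should have at least 2)
--     assistant_count = sum(1 for msg in messages if msg.get("role") == "assistant")
--
--     # Don't offer post-code options on first response
--     # This prevents showing debugging options immediately after a simple prompt
--     is_not_first_response = assistant_count > 1
--
--     # Check if last user message was a post-code choice
--     # If yes, don't offer options again (avoid loop)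
--     last_user_msg = None
--     for msg in reversed(messages):
--         if msg.get("role") == "user":
--             last_user_msg = msg.get("content", "").lower()
--             break
--
--     if last_user_msg:
--         post_code_keywords = ["debugging", "verbesserung", "improvement", "weitere schritte", "next steps"]
--         is_post_code_choice = any(kw in last_user_msg for kw in post_code_keywords)
--         if is_post_code_choice:
--             return False  # Don't offer options after user already chose one
--
--     return has_code and is_substantial and is_not_first_response
-- ===== SOURCE B (Python) =====
-- def should_offer_post_code_options(messages):
--     if len(messages) < 3:
--         return False
--     last_assistant = None
--     last_user = None
--     assistant_count = 0
--     for msg in reversed(messages):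
--         role = msg.get("role")
--         if role == "assistant":
--             assistant_count += 1
--             if last_assistant is None:
--                 last_assistant = msg.get("content", "")
--         elif role == "user" and last_user is None:
--             last_user = msg.get("content", "")
--     if not last_assistant:
--         return False
--     lowered = (last_user or "").lower()
--     if any(kw in lowered for kw in ("debugging", "verbesserung", "improvement", "weitere schritte", "next steps")):
--         return False
--     return "```" in last_assistant and len(last_assistant) > 1000 and assistant_count > 1
-- ===== Notes on version B (the rewrite author's own statement) =====
-- stated objective: alternative
-- what changed: A makes three separate passes over the messages (one reversed scan for the last assistant message, a full scan counting assistant messages, another reversed scan for the last user message); B gathers all three facts in a single backward pass maintaining (last assistant content, last user content, assistant count) and then applies the same decision logic once.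
import Mathlib
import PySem

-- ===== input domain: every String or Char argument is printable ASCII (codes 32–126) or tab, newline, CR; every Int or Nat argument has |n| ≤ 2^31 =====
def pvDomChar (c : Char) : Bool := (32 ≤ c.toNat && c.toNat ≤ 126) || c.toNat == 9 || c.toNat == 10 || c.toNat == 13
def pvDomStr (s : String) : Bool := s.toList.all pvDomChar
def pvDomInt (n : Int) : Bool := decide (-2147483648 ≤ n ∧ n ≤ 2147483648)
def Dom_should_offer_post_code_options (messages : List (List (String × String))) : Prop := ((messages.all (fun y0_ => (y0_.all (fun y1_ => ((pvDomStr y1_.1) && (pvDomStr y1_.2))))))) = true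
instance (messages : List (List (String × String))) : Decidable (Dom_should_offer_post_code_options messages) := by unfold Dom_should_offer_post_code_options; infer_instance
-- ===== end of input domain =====

-- B replaces A's three separate scans of `messages` by one backward pass collecting
-- (last assistant content, last user content, assistant count); same decision logic, same results.

-- ===== PORT A =====
def pvRole (m : List (String × String)) : Option String := (PySem.Dict.mk m).get? "role"
def pvContent (m : List (String × String)) : String := (PySem.Dict.mk m).getD "content" ""
def pvKeywords : List String := ["debugging", "verbesserung", "improvement", "weitere schritte", "next steps"]

-- first loop of A: over reversed(messages), break at the first assistant message
def pvFindAssistant : List (List (String × String)) → Option String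
  | [] => none
  | m :: rest => if pvRole m == some "assistant" then some (pvContent m) else pvFindAssistant rest

-- second reversed loop of A: first user message, content lowered at assignment
def pvFindUser : List (List (String × String)) → Option String
  | [] => none
  | m :: rest => if pvRole m == some "user" then some (PySem.Str.lower (pvContent m)) else pvFindUser rest

def should_offer_post_code_options (messages : List (List (String × String))) : Bool :=
  if messages.length = 0 ∨ messages.length < 3 then false
  else
    match pvFindAssistant messages.reverse with
    | none => false
    | some last_assistant_msg =>
      if last_assistant_msg = "" then false
      else
        let has_code := PySem.Str.isIn "```" last_assistant_msg
        let is_substantial := PySem.Str.len last_assistant_msg > 1000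
        let assistant_count : Int :=
          (messages.map (fun m => if pvRole m == some "assistant" then (1 : Int) else 0)).sum
        let is_not_first_response := assistant_count > 1
        let res := has_code && is_substantial && is_not_first_response
        match pvFindUser messages.reverse with
        | none => res
        | some last_user_msg =>
          if last_user_msg ≠ "" then
            if pvKeywords.any (fun kw => PySem.Str.isIn kw last_user_msg) then false else res
          else res

-- ===== PORT B =====
-- one step of B's single backward pass: state = (last assistant content, last user content, assistant count)
def pvStep (st : Option String × Option String × Int) (m : List (String × String)) :
    Option String × Option String × Int :=
  let role := pvRole m
  if role == some "assistant" then
    ((if st.1.isNone then some (pvContent m) else st.1), st.2.1, st.2.2 + 1)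
  else if role == some "user" && st.2.1.isNone then
    (st.1, some (pvContent m), st.2.2)
  else st

def should_offer_post_code_options_alt (messages : List (List (String × String))) : Bool :=
  if messages.length < 3 then false
  else
    let st := messages.reverse.foldl pvStep (none, none, 0)
    match st.1 with
    | none => false
    | some last_assistant =>
      if last_assistant = "" then false
      else
        let lowered := PySem.Str.lower (st.2.1.getD "")
        if pvKeywords.any (fun kw => PySem.Str.isIn kw lowered) then false
        else PySem.Str.isIn "```" last_assistant && PySem.Str.len last_assistant > 1000 && st.2.2 > 1

-- ===== PRECONDITION & SPEC =====
def Spec_should_offer_post_code_options (messages : List (List (String × String))) (out : Bool) : Prop := out = should_offer_post_code_options_alt messages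
instance (messages : List (List (String × String))) (out : Bool) : Decidable (Spec_should_offer_post_code_options messages out) := by unfold Spec_should_offer_post_code_options; infer_instance

-- ===== CLAIM (what is proved, stated in full; the proofs are below) =====
def Claim_equal_should_offer_post_code_options : Prop := ∀ (messages : List (List (String × String))), Dom_should_offer_post_code_options messages → Spec_should_offer_post_code_options messages (should_offer_post_code_options messages)

-- ===== LEMMAS AND PROOFS =====

-- B's raw last user content (B lowers only at the end); relates to A's pvFindUser by mapping lower
def pvFindUserRaw : List (List (String × String)) → Option String
  | [] => none
  | m :: rest => if pvRole m == some "user" then some (pvContent m) else pvFindUserRaw rest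

def pvCountA (r : List (List (String × String))) : Int :=
  ((r.filter (fun m => pvRole m == some "assistant")).length : Int)

lemma pvFindUser_eq_map (r : List (List (String × String))) :
    pvFindUser r = (pvFindUserRaw r).map PySem.Str.lower := by
  induction r with
  | nil => rfl
  | cons m rest ih =>
    simp only [pvFindUser, pvFindUserRaw]
    split_ifs
    · simp
    · simp [ih]

lemma pvScan_eq (r : List (List (String × String))) (a u : Option String) (c : Int) :
    r.foldl pvStep (a, u, c) = (a.or (pvFindAssistant r), u.or (pvFindUserRaw r), c + pvCountA r) := by
  induction r generalizing a u c with
  | nil => simp [pvCountA, pvFindAssistant, pvFindUserRaw]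
  | cons m rest ih =>
    simp only [List.foldl_cons, pvStep, pvFindAssistant, pvFindUserRaw]
    by_cases ha : pvRole m == some "assistant"
    · have hu : ¬ (pvRole m == some "user") = true := by
        simp_all
      cases a <;> (simp [ha, hu, ih, pvCountA]; ring_nf)
    · by_cases hu : pvRole m == some "user"
      · cases u
        · simp [ha, hu, ih, pvCountA]
        · simp [ha, hu, ih, pvCountA]
      · simp [ha, hu, ih, pvCountA]

lemma pvCountA_reverse (r : List (List (String × String))) : pvCountA r.reverse = pvCountA r := by
  simp [pvCountA, List.filter_reverse]

lemma pvSum_eq_countA (r : List (List (String × String))) :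
    (r.map (fun m => if pvRole m == some "assistant" then (1 : Int) else 0)).sum = pvCountA r := by
  induction r with
  | nil => rfl
  | cons m rest ih =>
    simp only [List.map_cons, List.sum_cons, ih, pvCountA, List.filter_cons]
    split_ifs <;> simp_all <;> ring

-- ===== VERDICT (by name: the statement is the Claim_ definition above) =====
theorem should_offer_post_code_options_spec : Claim_equal_should_offer_post_code_options := by
  intro messages _
  unfold Spec_should_offer_post_code_options
  unfold should_offer_post_code_options should_offer_post_code_options_alt
  by_cases hlen : messages.length < 3
  · simp [hlen]
  · have hne : ¬ (messages.length = 0 ∨ messages.length < 3) := by omega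
    rw [if_neg hne, if_neg hlen, pvScan_eq]
    simp only [Option.none_or, zero_add, pvSum_eq_countA, ← pvCountA_reverse messages,
      pvFindUser_eq_map]
    cases hA : pvFindAssistant messages.reverse with
    | none => rfl
    | some la =>
      by_cases hla : la = ""
      · simp [hla]
      · dsimp only
        rw [if_neg hla, if_neg hla]
        cases hU : pvFindUserRaw messages.reverse with
        | none =>
          simp only [Option.map_none, Option.getD_none]
          rw [if_neg (by decide :
            ¬ (pvKeywords.any fun kw => PySem.Str.isIn kw (PySem.Str.lower "")) = true)]
        | some ur =>
          simp only [Option.map_some, Option.getD_some]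
          by_cases hur : PySem.Str.lower ur = ""
          · simp only [hur]
            rw [if_neg (by simp : ¬ ("" : String) ≠ ""),
              if_neg (by decide : ¬ (pvKeywords.any fun kw => PySem.Str.isIn kw "") = true)]
          · rw [if_pos hur]
            split_ifs <;> rfl
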